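-- pv_equiv track=rewrite | github.com/NervanaSystems/ngraph-python | tests/flex_tests/test_flexconv.py | pixel_indices
-- ===== SOURCE A (Python) =====
-- def pixel_indices(T, R, S, D, H, W, C, mt, pr, qs):
--     HW = H * W
--     DHW = D * H * W
--     imax = C * DHW
--
--     idx = []
--     for c in range(C):
--         ci = c * DHW
--
--         for t in range(T):
--             z = mt + t
--             zi = ci + z * HW
--             zb = z >= 0 and z < D
--
--             for r in range(R):
--                 y = pr + r
--                 yi = zi + y * W
--                 yb = zb and y >= 0 and y < H
--
--                 for s in range(S):
--                     x = qs + s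
--                     if yb and x >= 0 and x < W:
--                         xi = yi + x
--                     else:
--                         xi = imax  # out of bounds
--
--                     idx.append(xi)
--     return idx
-- ===== SOURCE B (Python) =====
-- def pixel_indices(T, R, S, D, H, W, C, mt, pr, qs):
--     if T <= 0 or R <= 0 or S <= 0 or C <= 0:
--         return []
--     HW = H * W
--     DHW = D * HW
--     imax = C * DHW
--     RS = R * S
--     # One channel-independent pattern over a single flattened index, decoded by divmod.
--     pattern = []
--     for k in range(T * RS):
--         t, rem = divmod(k, RS)
--         r, s = divmod(rem, S)
--         z, y, x = mt + t, pr + r, qs + s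
--         if 0 <= z < D and 0 <= y < H and 0 <= x < W:
--             pattern.append(z * HW + y * W + x)
--         else:
--             pattern.append(None)
--     out = []
--     for c in range(C):
--         ci = c * DHW
--         out.extend(imax if p is None else ci + p for p in pattern)
--     return out
-- ===== Notes on version B (the rewrite author's own statement) =====
-- stated objective: alternative
-- what changed: B linearises the T×R×S window into one flat loop decoded by divmod, builds the channel-independent offset pattern once (None marking out-of-bounds), and then replicates it across the C channels, instead of A's four nested loops recomputing accumulated partial sums and chained bounds flags for every channel.
import Mathlib
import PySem

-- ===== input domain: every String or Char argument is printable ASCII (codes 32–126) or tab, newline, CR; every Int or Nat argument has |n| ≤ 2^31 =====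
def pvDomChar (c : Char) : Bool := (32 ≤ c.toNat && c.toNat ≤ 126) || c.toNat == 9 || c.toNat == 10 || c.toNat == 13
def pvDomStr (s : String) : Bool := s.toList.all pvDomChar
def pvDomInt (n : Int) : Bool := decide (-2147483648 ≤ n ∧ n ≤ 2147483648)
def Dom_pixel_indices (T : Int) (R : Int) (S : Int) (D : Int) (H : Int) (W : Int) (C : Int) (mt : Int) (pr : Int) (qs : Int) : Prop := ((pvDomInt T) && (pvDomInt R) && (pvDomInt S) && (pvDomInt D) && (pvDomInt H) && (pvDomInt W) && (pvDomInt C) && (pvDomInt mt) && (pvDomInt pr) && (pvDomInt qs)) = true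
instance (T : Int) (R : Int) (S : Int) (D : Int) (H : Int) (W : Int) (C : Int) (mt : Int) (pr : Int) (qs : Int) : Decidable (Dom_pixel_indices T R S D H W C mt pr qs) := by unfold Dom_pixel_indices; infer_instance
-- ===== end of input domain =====

-- B linearises the T×R×S window into one flat loop decoded by divmod, builds the
-- channel-independent pattern ONCE (Option Int: none = out of bounds), then replicates
-- it across channels, instead of A's four nested loops recomputing partial sums and
-- chained bounds flags per channel (objective: alternative).

-- ===== PORT A =====
def pixel_indices (T : Int) (R : Int) (S : Int) (D : Int) (H : Int) (W : Int) (C : Int) (mt : Int) (pr : Int) (qs : Int) : List Int :=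
  let HW := H * W
  let DHW := D * H * W
  let imax := C * DHW
  (PySem.List.pyRange 0 C 1).foldl (fun idx c =>
    let ci := c * DHW
    (PySem.List.pyRange 0 T 1).foldl (fun idx t =>
      let z := mt + t
      let zi := ci + z * HW
      let zb := decide (z ≥ 0) && decide (z < D)
      (PySem.List.pyRange 0 R 1).foldl (fun idx r =>
        let y := pr + r
        let yi := zi + y * W
        let yb := zb && decide (y ≥ 0) && decide (y < H)
        (PySem.List.pyRange 0 S 1).foldl (fun idx s =>
          let x := qs + s
          let xi := if yb && decide (x ≥ 0) && decide (x < W) then yi + x else imax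
          idx ++ [xi]) idx) idx) idx) []

-- ===== PORT B =====
def pixel_indices_alt (T : Int) (R : Int) (S : Int) (D : Int) (H : Int) (W : Int) (C : Int) (mt : Int) (pr : Int) (qs : Int) : List Int :=
  if T ≤ 0 ∨ R ≤ 0 ∨ S ≤ 0 ∨ C ≤ 0 then [] else
  let HW := H * W
  let DHW := D * HW
  let imax := C * DHW
  let RS := R * S
  let pattern : List (Option Int) := (PySem.List.pyRange 0 (T * RS) 1).map (fun k =>
    let t := PySem.Int.floordiv k RS
    let rem := PySem.Int.mod k RS
    let r := PySem.Int.floordiv rem S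
    let s := PySem.Int.mod rem S
    let z := mt + t
    let y := pr + r
    let x := qs + s
    if decide (0 ≤ z) && decide (z < D) && decide (0 ≤ y) && decide (y < H) && decide (0 ≤ x) && decide (x < W)
    then some (z * HW + y * W + x) else none)
  (PySem.List.pyRange 0 C 1).foldl (fun out c =>
    let ci := c * DHW
    out ++ pattern.map (fun p => match p with | none => imax | some v => ci + v)) []

-- ===== PRECONDITION & SPEC =====
def Spec_pixel_indices (T : Int) (R : Int) (S : Int) (D : Int) (H : Int) (W : Int) (C : Int) (mt : Int) (pr : Int) (qs : Int) (out : List Int) : Prop := out = pixel_indices_alt T R S D H W C mt pr qs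
instance (T : Int) (R : Int) (S : Int) (D : Int) (H : Int) (W : Int) (C : Int) (mt : Int) (pr : Int) (qs : Int) (out : List Int) : Decidable (Spec_pixel_indices T R S D H W C mt pr qs out) := by unfold Spec_pixel_indices; infer_instance

-- ===== CLAIM (what is proved, stated in full; the proofs are below) =====
def Claim_equal_pixel_indices : Prop := ∀ (T : Int) (R : Int) (S : Int) (D : Int) (H : Int) (W : Int) (C : Int) (mt : Int) (pr : Int) (qs : Int), Dom_pixel_indices T R S D H W C mt pr qs → Spec_pixel_indices T R S D H W C mt pr qs (pixel_indices T R S D H W C mt pr qs)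

-- ===== LEMMAS AND PROOFS =====

theorem pvRangeNil (n : Int) (h : n ≤ 0) : PySem.List.pyRange 0 n 1 = [] := by
  rw [PySem.List.pyRange_one]
  simp only [List.map_eq_nil_iff, List.range_eq_nil]
  omega

theorem pixel_indices_empty (T R S D H W C mt pr qs : Int) (h : C ≤ 0 ∨ T ≤ 0 ∨ R ≤ 0 ∨ S ≤ 0) :
    pixel_indices T R S D H W C mt pr qs = [] := by
  unfold pixel_indices
  rcases h with h | h | h | h
  · simp [pvRangeNil _ h]
  all_goals simp only [pvRangeNil _ h]; simp

theorem pvRangeMulSplit (a b : Nat) :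
    List.range (a * b) = (List.range a).flatMap (fun i => (List.range b).map (fun j => i * b + j)) := by
  induction a with
  | zero => simp
  | succ a ih =>
    rw [Nat.succ_mul, List.range_add, List.range_succ, List.flatMap_append, ih]
    simp

theorem pvFloordivRecover (t m q : Int) (hq : 0 < q) (h0 : 0 ≤ m) (h1 : m < q) :
    PySem.Int.floordiv (t * q + m) q = t ∧ PySem.Int.mod (t * q + m) q = m := by
  have hd : PySem.Int.floordiv (t * q + m) q = t := by
    rw [PySem.Int.floordiv_eq_iff_of_pos hq]
    constructor <;> nlinarith
  refine ⟨hd, ?_⟩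
  have := PySem.Int.floordiv_mul_add_mod (t * q + m) q
  rw [hd] at this
  omega

theorem pixel_indices_eq_alt_pos (T R S D H W C mt pr qs : Int) (hT : 0 < T) (hR : 0 < R) (hS : 0 < S) (hC : 0 < C) :
    pixel_indices T R S D H W C mt pr qs = pixel_indices_alt T R S D H W C mt pr qs := by
  unfold pixel_indices pixel_indices_alt
  rw [if_neg (by omega)]
  simp only [PySem.List.foldl_append_singleton_eq_map, PySem.List.foldl_append_eq_flatMap, List.nil_append]
  apply List.flatMap_congr
  intro c _
  rw [List.map_map]
  simp only [PySem.List.pyRange_one, Int.sub_zero]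
  rw [Int.toNat_mul (by omega) (by positivity), Int.toNat_mul (by omega) (by omega)]
  simp only [pvRangeMulSplit, List.flatMap_map, List.map_flatMap, List.map_map]
  apply List.flatMap_congr
  intro t ht
  apply List.flatMap_congr
  intro r hr
  apply List.map_congr_left
  intro s hs
  simp only [List.mem_range] at ht hr hs
  have hRS : (0:Int) < R * S := by positivity
  have hcast : ((t * (R.toNat * S.toNat) + (r * S.toNat + s) : Nat) : Int)
      = (t:Int) * (R * S) + ((r:Int) * S + (s:Int)) := by
    push_cast [Int.toNat_of_nonneg (le_of_lt hR), Int.toNat_of_nonneg (le_of_lt hS)]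
    ring
  have htI : (t:Int) < T := by omega
  have hrI : (r:Int) < R := by omega
  have hsI : (s:Int) < S := by omega
  have hmb0 : (0:Int) ≤ (r:Int) * S + (s:Int) := by positivity
  have hmb1 : (r:Int) * S + (s:Int) < R * S := by
    nlinarith [mul_le_mul_of_nonneg_right (by omega : (r:Int) ≤ R - 1) (le_of_lt hS)]
  obtain ⟨hd1, hm1⟩ := pvFloordivRecover (t:Int) ((r:Int)*S + s) (R*S) hRS hmb0 hmb1
  obtain ⟨hd2, hm2⟩ := pvFloordivRecover (r:Int) (s:Int) S hS (by positivity) hsI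
  simp only [Function.comp_apply, hcast, hd1, hm1, hd2, hm2, ge_iff_le, zero_add]
  split_ifs with h1
  · show c * (D * H * W) + (mt + (t:Int)) * (H * W) + (pr + (r:Int)) * W + (qs + (s:Int))
        = c * (D * (H * W)) + ((mt + (t:Int)) * (H * W) + (pr + (r:Int)) * W + (qs + (s:Int)))
    ring
  · show C * (D * H * W) = C * (D * (H * W))
    ring

-- ===== VERDICT (by name: the statement is the Claim_ definition above) =====
theorem pixel_indices_spec : Claim_equal_pixel_indices := by
  intro T R S D H W C mt pr qs _
  unfold Spec_pixel_indices
  by_cases hg : T ≤ 0 ∨ R ≤ 0 ∨ S ≤ 0 ∨ C ≤ 0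
  · rw [pixel_indices_empty T R S D H W C mt pr qs (by tauto)]
    unfold pixel_indices_alt
    rw [if_pos hg]
  · exact pixel_indices_eq_alt_pos T R S D H W C mt pr qs (by omega) (by omega) (by omega) (by omega)
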